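-- pv_equiv track=rewrite | github.com/rtqichen/ffjord | lib/odenvp.py | _calc_n_scale
-- ===== SOURCE A (Python) =====
-- def _calc_n_scale(input_size):
--     _, _, h, w = input_size
--     n_scale = 0
--     while h >= 4 and w >= 4:
--         n_scale += 1
--         h = h // 2
--         w = w // 2
--     return n_scale
-- ===== SOURCE B (Python) =====
-- def _calc_n_scale(input_size):
--     _, _, h, w = input_size
--     m = max(min(h, w), 0)
--     return max(0, m.bit_length() - 2)
-- ===== Notes on version B (the rewrite author's own statement) =====
-- stated objective: simpler
-- what changed: Replaces the iterative halving while-loop with the closed form max(0, max(min(h,w),0).bit_length() - 2).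
import Mathlib
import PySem

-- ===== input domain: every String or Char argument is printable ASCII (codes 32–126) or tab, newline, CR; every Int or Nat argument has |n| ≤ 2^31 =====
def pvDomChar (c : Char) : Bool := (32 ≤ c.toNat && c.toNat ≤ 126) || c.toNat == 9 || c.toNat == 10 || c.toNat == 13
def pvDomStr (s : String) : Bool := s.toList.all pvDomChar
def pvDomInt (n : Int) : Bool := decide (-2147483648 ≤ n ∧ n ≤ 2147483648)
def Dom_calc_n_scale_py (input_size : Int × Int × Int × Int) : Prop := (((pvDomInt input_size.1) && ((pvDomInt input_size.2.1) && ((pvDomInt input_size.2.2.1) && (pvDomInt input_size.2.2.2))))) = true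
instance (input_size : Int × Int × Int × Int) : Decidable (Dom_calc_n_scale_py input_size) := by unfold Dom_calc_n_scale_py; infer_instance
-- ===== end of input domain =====

-- B replaces A's iterative halving loop with the closed form max(0, min(h,w).bit_length() - 2) (objective: simpler).

-- ===== PORT A =====
-- the while-loop of _calc_n_scale, state (h, w, n_scale)
def calcLoopA (h w n : Int) : Int :=
  if h ≥ 4 ∧ w ≥ 4 then
    calcLoopA (PySem.Int.floordiv h 2) (PySem.Int.floordiv w 2) (n + 1)
  else n
termination_by h.toNat
decreasing_by
  rw [PySem.Int.floordiv_eq_ediv_of_pos (by omega : (0:Int) < 2)]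
  omega

def calc_n_scale_py (input_size : Int × Int × Int × Int) : Int :=
  calcLoopA input_size.2.2.1 input_size.2.2.2 0

-- ===== PORT B =====
def calc_n_scale_py_alt (input_size : Int × Int × Int × Int) : Int :=
  let m : Int := max (min input_size.2.2.1 input_size.2.2.2) 0
  max 0 ((PySem.Int.bitLength m : Int) - 2)

-- ===== PRECONDITION & SPEC =====
def Spec_calc_n_scale_py (input_size : Int × Int × Int × Int) (out : Int) : Prop := out = calc_n_scale_py_alt input_size
instance (input_size : Int × Int × Int × Int) (out : Int) : Decidable (Spec_calc_n_scale_py input_size out) := by unfold Spec_calc_n_scale_py; infer_instance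

-- ===== CLAIM (what is proved, stated in full; the proofs are below) =====
def Claim_equal_calc_n_scale_py : Prop := ∀ (input_size : Int × Int × Int × Int), Dom_calc_n_scale_py input_size → Spec_calc_n_scale_py input_size (calc_n_scale_py input_size)

-- ===== LEMMAS AND PROOFS =====

lemma bitLength_ge_two {m : Int} (hm : 2 ≤ m) : 2 ≤ PySem.Int.bitLength m := by
  have h1 := PySem.Int.lt_two_pow_bitLength m
  rcases Nat.lt_or_ge (PySem.Int.bitLength m) 2 with hlt | hge
  · interval_cases hb : PySem.Int.bitLength m <;> norm_num at h1 <;> omega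
  · exact hge

lemma min_floordiv_two (a b : Int) :
    min (PySem.Int.floordiv a 2) (PySem.Int.floordiv b 2) = PySem.Int.floordiv (min a b) 2 := by
  rw [PySem.Int.floordiv_eq_ediv_of_pos (by omega : (0:Int) < 2),
      PySem.Int.floordiv_eq_ediv_of_pos (by omega : (0:Int) < 2),
      PySem.Int.floordiv_eq_ediv_of_pos (by omega : (0:Int) < 2)]
  rcases le_total a b with h | h
  · rw [min_eq_left h, min_eq_left (by omega)]
  · rw [min_eq_right h, min_eq_right (by omega)]

lemma calcLoopA_closed (h w n : Int) :
    calcLoopA h w n = n + max 0 ((PySem.Int.bitLength (max (min h w) 0) : Int) - 2) := by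
  induction h, w, n using calcLoopA.induct with
  | case1 h w n hcond ih =>
    rw [calcLoopA, if_pos hcond, ih, min_floordiv_two]
    obtain ⟨h4, w4⟩ := hcond
    have hm4 : 4 ≤ min h w := le_min h4 w4
    have hfd : PySem.Int.floordiv (min h w) 2 = (min h w) / 2 :=
      PySem.Int.floordiv_eq_ediv_of_pos (by omega)
    have hhalf : 2 ≤ (min h w) / 2 := by omega
    rw [hfd, max_eq_left (by omega : (0:Int) ≤ min h w / 2),
        max_eq_left (by omega : (0:Int) ≤ min h w)]
    have hbl : PySem.Int.bitLength (min h w)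
        = PySem.Int.bitLength (PySem.Int.floordiv (min h w) 2) + 1 :=
      PySem.Int.bitLength_of_pos (by omega)
    rw [hfd] at hbl
    have h2 : 2 ≤ PySem.Int.bitLength (min h w / 2) := bitLength_ge_two (by omega)
    rw [hbl]
    push_cast
    rw [max_eq_right (by omega : (0:Int) ≤ (PySem.Int.bitLength (min h w / 2) : Int) - 2),
        max_eq_right (by omega : (0:Int) ≤ (PySem.Int.bitLength (min h w / 2) : Int) + 1 - 2)]
    ring
  | case2 h w n hcond =>
    rw [calcLoopA, if_neg hcond]
    have hm : max (min h w) 0 < 4 := by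
      simp only [not_and_or, not_le] at hcond
      rcases hcond with hc | hc <;> simp <;> omega
    have hm0 : 0 ≤ max (min h w) 0 := le_max_right _ _
    set m : Int := max (min h w) 0 with hmdef
    have hbl : (PySem.Int.bitLength m : Int) ≤ 2 := by
      interval_cases m <;> decide
    omega

-- ===== VERDICT (by name: the statement is the Claim_ definition above) =====
theorem calc_n_scale_py_spec : Claim_equal_calc_n_scale_py := by
  intro input_size _
  unfold Spec_calc_n_scale_py calc_n_scale_py calc_n_scale_py_alt
  rw [calcLoopA_closed]
  simp
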